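/-
  INTERFACE CHECK for the footprint `deint.wins` of codebook_decode_deinterleave_repeat (Vorbis/Spec/Codebook.lean, CONTRACTS 55:
  "outputs[k][p] for k<ch, p<len (only non-NULL outputs[k])"): a NULL pointer of the table contributes NO window (the farm's
  CONTRACT-POST problem of freeze-7, units decode_residue.4 and decode_residue.6: with the window `[0, 4·len)` of a NULL pointer in
  the list, the caller could not re-establish `Common.same` after the call, its own footprint having nothing below 100000H).

      the callee's side      a float store into `outputs[k][p]` happens behind `if (outputs[c_inter])` only, so the window of the store
                             is a window of the footprint: `deint.wins_window_mem` (needs `outputs[k] ≠ 0`)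
      the caller's side      decode_residue, call sites 0x10f18e (segment .4) and 0x10f538 (segment .6): every window of the callee lies
                             inside a window of `g.spec.footprint g.e`: `Entered.deint_wins_inside`; `Common.same` after the call:
                             `Entered.same_through_deint` (Vorbis/Spec/DecodeResidueCarry.lean)
-/
import Vorbis.Spec.DecodeResidueCarry
import Vorbis.Spec.Codebook.Deint
namespace Vorbis.Spec.DeintFootprintTest
open X86 X86.User Asan Vorbis Vorbis.Spec Vorbis.Spec.DecodeResidue

/-- The callee's side: the window of a non-NULL pointer is a window of the contract's footprint (after the stack window). -/
example (others : List Obj) (frames : List (Nat × FrameLayout)) (Blk : Block → Prop) (len : Nat) (e : State) (k : Nat)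
    (hk : k < argU32 (e.reg .rcx)) (hnz : e.mem.ptr ((e.reg .rdx).toNat + 8 * k) ≠ 0) :
    (deint.window e.mem (e.reg .rdx).toNat (e.mem.u32 ((e.reg .rsp).toNat + 8)) k).span ∈
      (codebook_decode_deinterleave_repeat.spec others frames Blk len).footprint e := by
  unfold Spec.footprint
  apply List.mem_cons_of_mem
  exact deint.wins_window_mem hk hnz

/-- A window of an output pointer in the list belongs to a NON-NULL pointer: nothing of the list is the window `[0, 4·len)`. -/
example (u : State) (w : Span) (hw : w ∈ deint.wins u) (hlo : w.lo = 0) (hf : 0 < (u.reg .rdi).toNat)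
    (h8 : 0 < (u.reg .r8).toNat) (h9 : 0 < (u.reg .r9).toNat) : False := by
  rcases deint.wins_cases hw with hb | h | h | h | ⟨k, _, hnz, h⟩
  · unfold bookWins at hb
    simp only [List.mem_cons, List.not_mem_nil, or_false] at hb
    rcases hb with h | h | h | h | h
    all_goals
      rw [h] at hlo
      simp only [] at hlo
      omega
  · rw [h] at hlo
    simp only [] at hlo
    omega
  · rw [h] at hlo
    simp only [] at hlo
    omega
  · rw [h] at hlo
    simp only [] at hlo
    omega
  · rw [h] at hlo
    simp only [] at hlo
    exact hnz hlo

/-- The caller's side, as the walker presents it: `w_same` of the call is `Mem.SameExcept (<the callee's Spec>.footprint s) s.mem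
m` for the state `s` at the callee's first instruction; `Common.same` after the return follows in one line. -/
example {u₀ : State} {g : G} (he : Entered u₀ g) {s : State} {m : Mem}
    (others : List Obj) (frames : List (Nat × FrameLayout)) (Blk : Block → Prop) (len : Nat)
    (hsame : Mem.SameExcept (g.spec.footprint g.e) g.e.mem s.mem)
    (hrsp : (s.reg .rsp).toNat = g.RA - 272) (hrdi : (s.reg .rdi).toNat = g.f) (hrdx : (s.reg .rdx).toNat = g.rb)
    (hrcx : argU32 (s.reg .rcx) = g.ch) (hr8 : (s.reg .r8).toNat = g.ci) (hr9 : (s.reg .r9).toNat = g.pi)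
    (hlen : s.mem.u32 (g.RA - 264) = g.n)
    (w_same : Mem.SameExcept ((codebook_decode_deinterleave_repeat.spec others frames Blk len).footprint s) s.mem m) :
    Mem.SameExcept (g.spec.footprint g.e) g.e.mem m := by
  have hroom := he.room
  exact he.same_through_deint hsame hrsp hrdi hrdx hrcx hr8 hr9 hlen (lo := (s.reg .rsp).toNat - 496)
    (hi := (s.reg .rsp).toNat) (by omega) (by omega) (by omega) w_same

end Vorbis.Spec.DeintFootprintTest
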